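-- pv_equiv track=rewrite | github.com/visaplan/kitchen | src/visaplan/kitchen/spoons.py | parent_chapters
-- ===== SOURCE A (Python) =====
-- def parent_chapters(tup):
--     """
--     Für Gruppierung in Verzeichnissen: Generiere die Nummern der Elternkapitel
--
--     >>> list(parent_chapters((1, 2, 3)))
--     [(1,), (1, 2), (1, 2, 3)]
--     """
--     liz = list(tup)
--     stack = []
--     while liz:
--         stack.append(tuple(liz))
--         liz.pop()
--     while stack:
--         yield stack.pop()
-- ===== SOURCE B (Python) =====
-- def parent_chapters(tup):
--     for i in range(1, len(tup) + 1):
--         yield tup[:i]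
-- ===== Notes on version B (the rewrite author's own statement) =====
-- stated objective: simpler
-- what changed: Replaces the two-phase stack machinery (push ever-shorter copies, then pop in reverse) with a single forward loop that yields each prefix directly by slicing tup[:i] for i = 1..len(tup).
import Mathlib
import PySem

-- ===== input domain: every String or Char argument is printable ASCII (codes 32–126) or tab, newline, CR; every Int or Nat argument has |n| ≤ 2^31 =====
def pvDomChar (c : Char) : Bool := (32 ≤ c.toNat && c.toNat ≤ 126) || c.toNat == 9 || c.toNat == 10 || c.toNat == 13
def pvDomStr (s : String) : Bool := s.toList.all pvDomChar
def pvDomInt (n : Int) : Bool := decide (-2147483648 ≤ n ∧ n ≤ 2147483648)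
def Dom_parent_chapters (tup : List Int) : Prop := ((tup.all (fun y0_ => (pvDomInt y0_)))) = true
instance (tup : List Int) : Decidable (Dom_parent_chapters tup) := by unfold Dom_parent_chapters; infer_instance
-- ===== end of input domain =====

-- B yields each prefix directly by slicing in one forward loop; A pushes ever-shorter
-- copies onto a stack and then pops them in reverse.

-- ===== PORT A =====
-- while liz: stack.append(tuple(liz)); liz.pop()
def pcPush (liz : List Int) (stack : List (List Int)) : List (List Int) :=
  if _h : liz = [] then stack
  else pcPush liz.dropLast (stack ++ [liz])
termination_by liz.length
decreasing_by
  have : liz.length ≠ 0 := by simpa using _h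
  simp [List.length_dropLast]; omega

-- while stack: yield stack.pop()
def pcPop (stack : List (List Int)) : List (List Int) :=
  if h : stack = [] then []
  else stack.getLast h :: pcPop stack.dropLast
termination_by stack.length
decreasing_by
  have : stack.length ≠ 0 := by simpa using h
  simp [List.length_dropLast]; omega

def parent_chapters (tup : List Int) : List (List Int) :=
  pcPop (pcPush tup [])

-- ===== PORT B =====
-- for i in range(1, len(tup)+1): yield tup[:i]
def parent_chapters_alt (tup : List Int) : List (List Int) :=
  (PySem.List.pyRange 1 ((tup.length : Int) + 1) 1).map
    (fun i => PySem.List.slice tup none (some i))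

-- ===== PRECONDITION & SPEC =====
def Spec_parent_chapters (tup : List Int) (out : List (List Int)) : Prop := out = parent_chapters_alt tup
instance (tup : List Int) (out : List (List Int)) : Decidable (Spec_parent_chapters tup out) := by unfold Spec_parent_chapters; infer_instance

-- ===== CLAIM (what is proved, stated in full; the proofs are below) =====
def Claim_equal_parent_chapters : Prop := ∀ (tup : List Int), Dom_parent_chapters tup → Spec_parent_chapters tup (parent_chapters tup)

-- ===== LEMMAS AND PROOFS =====

-- the ascending prefix list both sides compute
def pcPrefixes (tup : List Int) : List (List Int) :=
  (List.range tup.length).map (fun k => tup.take (k + 1))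

lemma pcPush_eq (liz : List Int) (stack : List (List Int)) :
    pcPush liz stack = stack ++ (pcPrefixes liz).reverse := by
  induction liz, stack using pcPush.induct with
  | case1 stack =>
    simp [pcPush, pcPrefixes]
  | case2 liz stack h ih =>
    rw [pcPush, dif_neg h, ih]
    have hn : liz.length ≠ 0 := by simpa using h
    obtain ⟨m, hm⟩ : ∃ m, liz.length = m + 1 := ⟨liz.length - 1, by omega⟩
    have htail : pcPrefixes liz.dropLast
        = (List.range m).map (fun k => liz.take (k + 1)) := by
      unfold pcPrefixes
      rw [List.length_dropLast, hm]
      simp only [Nat.add_sub_cancel]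
      refine List.map_congr_left ?_
      intro k hk
      rw [List.mem_range] at hk
      rw [List.dropLast_eq_take, List.take_take]
      congr 1
      omega
    have hhead : liz.take (m + 1) = liz := List.take_of_length_le (by omega)
    rw [htail]
    unfold pcPrefixes
    rw [hm, List.range_succ]
    simp [hhead]

lemma pcPop_eq (stack : List (List Int)) : pcPop stack = stack.reverse := by
  induction stack using pcPop.induct with
  | case1 => simp [pcPop]
  | case2 stack h ih =>
    rw [pcPop, dif_neg h, ih]
    conv_rhs => rw [← List.dropLast_concat_getLast h]
    simp

lemma alt_eq (tup : List Int) : parent_chapters_alt tup = pcPrefixes tup := by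
  unfold parent_chapters_alt pcPrefixes
  rw [PySem.List.pyRange_one]
  rw [List.map_map]
  have hl : (((tup.length : Int) + 1 - 1).toNat) = tup.length := by omega
  rw [hl]
  refine List.map_congr_left ?_
  intro k hk
  rw [List.mem_range] at hk
  have : (1 : Int) + (k : Int) = ((k + 1 : Nat) : Int) := by push_cast; ring
  simp only [Function.comp, this, PySem.List.slice_to_natCast]

-- ===== VERDICT (by name: the statement is the Claim_ definition above) =====
theorem parent_chapters_spec : Claim_equal_parent_chapters := by
  intro tup _
  unfold Spec_parent_chapters parent_chapters
  rw [pcPush_eq, pcPop_eq, alt_eq]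
  simp
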